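-- pv_equiv track=rewrite | github.com/marcpocong/drifter-validated-oilspill-forecasting | src/services/dwh_phase3c_smoke.py | _single_blocker
-- ===== SOURCE A (Python) =====
-- SMOKE_RECOMMENDATION_BLOCKED = (
--     "adapter work still incomplete: HYCOM GOFS 3.1 reanalysis adapter/download for the 2010 DWH window is not scientific-ready"
-- )
--
-- def _single_blocker(adapter_status_rows: list[dict]) -> str:
--     priority = ["currents_primary", "winds_primary", "waves_primary", "currents_fallback"]
--     by_component = {
--         row["forcing_component"]: row
--         for row in adapter_status_rows
--         if row.get("source_role") == "scientific_target"
--     }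
--     for component in priority:
--         row = by_component.get(component)
--         if row and str(row.get("scientific_ready")).lower() != "true":
--             if component == "currents_primary":
--                 return SMOKE_RECOMMENDATION_BLOCKED
--             return f"adapter work still incomplete: {row['chosen_service']} is not scientific-ready ({row['stop_reason']})"
--     return SMOKE_RECOMMENDATION_BLOCKED
-- ===== SOURCE B (Python) =====
-- SMOKE_RECOMMENDATION_BLOCKED = (
--     "adapter work still incomplete: HYCOM GOFS 3.1 reanalysis adapter/download for the 2010 DWH window is not scientific-ready"
-- )
--
-- def _single_blocker(adapter_status_rows: list[dict]) -> str:
--     # Single reverse pass: a 'seen' set makes the first row found per component (= the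
--     # last in the original order, matching dict overwrite) the authoritative one, and an
--     # online argmin keeps the highest-priority blocked component found so far.
--     priority = {"currents_primary": 0, "winds_primary": 1, "waves_primary": 2, "currents_fallback": 3}
--     seen = set()
--     best = None  # (priority index, row) of the best blocked component so far
--     for row in reversed(adapter_status_rows):
--         if row.get("source_role") != "scientific_target":
--             continue
--         component = row["forcing_component"]
--         if component in seen:
--             continue
--         seen.add(component)
--         p = priority.get(component)
--         if p is not None and str(row.get("scientific_ready")).lower() != "true":
--             if best is None or p < best[0]:
--                 best = (p, row)
--     if best is None or best[0] == 0:
--         return SMOKE_RECOMMENDATION_BLOCKED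
--     row = best[1]
--     return f"adapter work still incomplete: {row['chosen_service']} is not scientific-ready ({row['stop_reason']})"
-- ===== Notes on version B (the rewrite author's own statement) =====
-- stated objective: alternative
-- what changed: B drops A's component->row dict and priority loop entirely: one reverse pass over the rows with a 'seen' set (first hit in reverse = last-wins) keeps an online argmin of the blocked priority index, and a single final check renders the message.
import Mathlib
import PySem

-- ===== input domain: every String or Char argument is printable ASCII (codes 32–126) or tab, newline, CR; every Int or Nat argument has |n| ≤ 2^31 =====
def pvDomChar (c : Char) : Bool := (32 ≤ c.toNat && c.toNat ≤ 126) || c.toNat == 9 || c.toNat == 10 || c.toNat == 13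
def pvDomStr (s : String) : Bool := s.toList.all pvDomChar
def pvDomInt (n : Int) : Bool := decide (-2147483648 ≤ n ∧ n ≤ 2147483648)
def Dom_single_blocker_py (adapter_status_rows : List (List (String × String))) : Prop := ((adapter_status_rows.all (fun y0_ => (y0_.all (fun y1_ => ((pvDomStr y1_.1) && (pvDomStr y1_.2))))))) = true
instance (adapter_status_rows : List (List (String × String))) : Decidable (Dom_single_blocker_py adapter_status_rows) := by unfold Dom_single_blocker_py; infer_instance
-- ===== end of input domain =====

-- B replaces A's component->row dict plus priority loop by ONE reverse pass over the rows with a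
-- 'seen' set (first occurrence in reverse = last-wins) and an online argmin of the blocked
-- priority index; same return value (objective: alternative).

-- ===== PORT A =====
def pvSMOKE : String :=
  "adapter work still incomplete: HYCOM GOFS 3.1 reanalysis adapter/download for the 2010 DWH window is not scientific-ready"

-- row.get(k) on a Python dict row (assoc list, first match)
def pvRowGet? (row : List (String × String)) (k : String) : Option String :=
  (row.find? (fun p => p.1 == k)).map (·.2)

-- str(x) for x = row.get("scientific_ready") (None prints as "None")
def pvStrOfOpt : Option String → String
  | some v => v
  | none => "None"

-- str(row.get("scientific_ready")).lower() != "true"  (appears verbatim in both Pythons)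
def pvBlocked (row : List (String × String)) : Bool :=
  PySem.Str.lower (pvStrOfOpt (pvRowGet? row "scientific_ready")) != "true"

-- the f-string; row['chosen_service']/row['stop_reason'] raise KeyError when missing (outside Pre_, getD "" there)
def pvMsg (row : List (String × String)) : String :=
  "adapter work still incomplete: " ++ (pvRowGet? row "chosen_service").getD "" ++
    " is not scientific-ready (" ++ (pvRowGet? row "stop_reason").getD "" ++ ")"

def pvPriority : List String :=
  ["currents_primary", "winds_primary", "waves_primary", "currents_fallback"]

-- one step of A's dict comprehension; row["forcing_component"] missing = KeyError (outside Pre_, skip)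
def pvAStep (d : PySem.Dict String (List (String × String))) (row : List (String × String)) :
    PySem.Dict String (List (String × String)) :=
  if pvRowGet? row "source_role" == some "scientific_target" then
    match pvRowGet? row "forcing_component" with
    | some k => d.insert k row
    | none => d
  else d

def pvALoop (d : PySem.Dict String (List (String × String))) : List String → String
  | [] => pvSMOKE
  | c :: rest =>
    match d.get? c with
    | some row =>
      if !row.isEmpty && pvBlocked row then
        if c = "currents_primary" then pvSMOKE else pvMsg row
      else pvALoop d rest
    | none => pvALoop d rest

def single_blocker_py (adapter_status_rows : List (List (String × String))) : String :=
  pvALoop (adapter_status_rows.foldl pvAStep PySem.Dict.empty) pvPriority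

-- ===== PORT B =====
-- priority.get(component) on the literal priority dict
def pvPriorityIdx (c : String) : Option Int :=
  (([("currents_primary", (0 : Int)), ("winds_primary", 1), ("waves_primary", 2),
     ("currents_fallback", 3)]).find? (fun p => p.1 == c)).map (·.2)

-- 'if best is None or p < best[0]: best = (p, row)'
def pvMerge (b : Option (Int × List (String × String))) (c : Int × List (String × String)) :
    Option (Int × List (String × String)) :=
  match b with
  | none => some c
  | some b' => if c.1 < b'.1 then some c else some b'

-- one iteration of B's reverse loop; state = (seen, best)
def pvBStep (st : PySem.Set String × Option (Int × List (String × String)))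
    (row : List (String × String)) :
    PySem.Set String × Option (Int × List (String × String)) :=
  if !(pvRowGet? row "source_role" == some "scientific_target") then st
  else
    match pvRowGet? row "forcing_component" with
    | none => st  -- Python raises KeyError here; outside Pre_
    | some c =>
      if PySem.Set.contains st.1 c then st
      else
        let seen' := PySem.Set.add st.1 c
        match pvPriorityIdx c with
        | some p => if pvBlocked row then (seen', pvMerge st.2 (p, row)) else (seen', st.2)
        | none => (seen', st.2)

def single_blocker_py_alt (adapter_status_rows : List (List (String × String))) : String :=
  match (adapter_status_rows.reverse.foldl pvBStep (PySem.Set.empty, none)).2 with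
  | none => pvSMOKE
  | some (p, row) => if p == 0 then pvSMOKE else pvMsg row

-- ===== PRECONDITION & SPEC =====
-- Pre_ excludes the inputs on which the Python A raises KeyError (a scientific_target row
-- without 'forcing_component', or a blocked non-primary priority row without
-- 'chosen_service'/'stop_reason'); it is slightly wider than the exact raise set — a row missing
-- those keys is excluded even when a higher-priority blocker or a later duplicate row makes A
-- return anyway (see cites) — because the exact set would re-simulate A's selection.
def Pre_single_blocker_py (adapter_status_rows : List (List (String × String))) : Prop :=
  ∀ row ∈ adapter_status_rows,
    pvRowGet? row "source_role" = some "scientific_target" →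
      (pvRowGet? row "forcing_component").isSome = true ∧
      (∀ c ∈ (["winds_primary", "waves_primary", "currents_fallback"] : List String),
        pvRowGet? row "forcing_component" = some c → pvBlocked row = true →
          (pvRowGet? row "chosen_service").isSome = true ∧
          (pvRowGet? row "stop_reason").isSome = true)
instance (adapter_status_rows : List (List (String × String))) : Decidable (Pre_single_blocker_py adapter_status_rows) := by
  unfold Pre_single_blocker_py; infer_instance

def pvWitness_single_blocker_py : (List (List (String × String))) :=
  [[("source_role", "scientific_target"), ("forcing_component", "currents_primary"),
    ("scientific_ready", "true")]]

def Spec_single_blocker_py (adapter_status_rows : List (List (String × String))) (out : String) : Prop := out = single_blocker_py_alt adapter_status_rows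
instance (adapter_status_rows : List (List (String × String))) (out : String) : Decidable (Spec_single_blocker_py adapter_status_rows out) := by unfold Spec_single_blocker_py; infer_instance

-- ===== CLAIM (what is proved, stated in full; the proofs are below) =====
def Claim_equal_single_blocker_py : Prop := ∀ (adapter_status_rows : List (List (String × String))), Dom_single_blocker_py adapter_status_rows → Pre_single_blocker_py adapter_status_rows → Spec_single_blocker_py adapter_status_rows (single_blocker_py adapter_status_rows)

-- ===== LEMMAS AND PROOFS =====

-- shared shorthands for the proofs
def pvIsTgt (r : List (String × String)) : Bool :=
  pvRowGet? r "source_role" == some "scientific_target"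

-- the authoritative (last-wins) row for component c, seen from the reversed list
def pvW (l : List (List (String × String))) (c : String) : Option (List (String × String)) :=
  l.find? (fun r => pvIsTgt r && (pvRowGet? r "forcing_component" == some c))

-- the candidate row component c contributes to B's argmin, given already-seen components
def pvCandAt (l : List (List (String × String))) (seen : PySem.Set String) (c : String) :
    Option (List (String × String)) :=
  if PySem.Set.contains seen c then none
  else
    match pvW l c with
    | some r => if pvBlocked r then some r else none
    | none => none

def pvStepC (acc : Option (Int × List (String × String)))
    (pc : Int × Option (List (String × String))) :
    Option (Int × List (String × String)) :=
  match pc.2 with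
  | some r => pvMerge acc (pc.1, r)
  | none => acc

def pvCandFold (l : List (List (String × String))) (seen : PySem.Set String)
    (best : Option (Int × List (String × String))) :
    Option (Int × List (String × String)) :=
  ([((0 : Int), pvCandAt l seen "currents_primary"),
    (1, pvCandAt l seen "winds_primary"),
    (2, pvCandAt l seen "waves_primary"),
    (3, pvCandAt l seen "currents_fallback")]).foldl pvStepC best

theorem pvMerge_comm (a : Option (Int × List (String × String)))
    (x y : Int × List (String × String)) (h : x.1 ≠ y.1) :
    pvMerge (pvMerge a x) y = pvMerge (pvMerge a y) x := by
  cases a <;> simp only [pvMerge] <;>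
    (try split_ifs) <;> (try simp only [pvMerge]) <;> (try split_ifs) <;>
    first | rfl | (exfalso; omega)

theorem pvStepC_comm (a : Option (Int × List (String × String)))
    (x y : Int × Option (List (String × String))) (h : x.1 ≠ y.1) :
    pvStepC (pvStepC a x) y = pvStepC (pvStepC a y) x := by
  obtain ⟨px, ox⟩ := x
  obtain ⟨py, oy⟩ := y
  cases ox <;> cases oy <;> simp only [pvStepC] <;> try rfl
  exact pvMerge_comm a _ _ h

theorem pvStepC_none (a : Option (Int × List (String × String))) (p : Int) :
    pvStepC a (p, none) = a := rfl

theorem pvMerge_as_stepC (a : Option (Int × List (String × String))) (p : Int)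
    (r : List (String × String)) : pvMerge a (p, r) = pvStepC a (p, some r) := rfl

theorem pvW_cons_neg {r : List (String × String)} {t : List (List (String × String))} {c : String}
    (h : (pvIsTgt r && (pvRowGet? r "forcing_component" == some c)) = false) :
    pvW (r :: t) c = pvW t c := by
  unfold pvW
  exact List.find?_cons_of_neg (by simp [h])

theorem pvCandAt_cons_neg {r : List (String × String)} {t : List (List (String × String))}
    {seen : PySem.Set String} {c : String}
    (h : (pvIsTgt r && (pvRowGet? r "forcing_component" == some c)) = false) :
    pvCandAt (r :: t) seen c = pvCandAt t seen c := by
  simp only [pvCandAt, pvW_cons_neg h]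

theorem pvContains_add_of_ne {seen : PySem.Set String} {c c0 : String} (h : c ≠ c0) :
    PySem.Set.contains (PySem.Set.add seen c0) c = PySem.Set.contains seen c := by
  cases hc2 : PySem.Set.contains seen c with
  | true =>
    exact (PySem.Set.contains_iff _ _).mpr
      ((PySem.Set.mem_add _ _ _).mpr (Or.inl ((PySem.Set.contains_iff _ _).mp hc2)))
  | false =>
    cases hc1 : PySem.Set.contains (PySem.Set.add seen c0) c with
    | false => rfl
    | true =>
      rcases (PySem.Set.mem_add _ _ _).mp ((PySem.Set.contains_iff _ _).mp hc1) with hm | hm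
      · rw [(PySem.Set.contains_iff _ _).mpr hm] at hc2; cases hc2
      · exact absurd hm h

theorem pvContains_add_self (seen : PySem.Set String) (c0 : String) :
    PySem.Set.contains (PySem.Set.add seen c0) c0 = true :=
  (PySem.Set.contains_iff _ _).mpr ((PySem.Set.mem_add _ _ _).mpr (Or.inr rfl))


-- B's fold equals the 4-candidate argmin over the last-wins rows
theorem pvB_inv (l : List (List (String × String))) (seen : PySem.Set String)
    (best : Option (Int × List (String × String))) :
    (l.foldl pvBStep (seen, best)).2 = pvCandFold l seen best := by
  induction l generalizing seen best with
  | nil => simp [pvCandFold, pvCandAt, pvW, pvStepC]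
  | cons r t ih =>
    rw [List.foldl_cons]
    cases htgt : (pvRowGet? r "source_role" == some "scientific_target") with
    | false =>
      have hstep : pvBStep (seen, best) r = (seen, best) := by simp [pvBStep, htgt]
      rw [hstep, ih]
      have hpred : ∀ c, (pvIsTgt r && (pvRowGet? r "forcing_component" == some c)) = false := by
        intro c; simp [pvIsTgt, htgt]
      unfold pvCandFold
      rw [pvCandAt_cons_neg (hpred _), pvCandAt_cons_neg (hpred _),
        pvCandAt_cons_neg (hpred _), pvCandAt_cons_neg (hpred _)]
    | true =>
      cases hfc : pvRowGet? r "forcing_component" with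
      | none =>
        have hstep : pvBStep (seen, best) r = (seen, best) := by simp [pvBStep, htgt, hfc]
        rw [hstep, ih]
        have hpred : ∀ c, (pvIsTgt r && (pvRowGet? r "forcing_component" == some c)) = false := by
          intro c; simp [hfc]
        unfold pvCandFold
        rw [pvCandAt_cons_neg (hpred _), pvCandAt_cons_neg (hpred _),
          pvCandAt_cons_neg (hpred _), pvCandAt_cons_neg (hpred _)]
      | some c0 =>
        cases hmem : PySem.Set.contains seen c0 with
        | true =>
          have hmem' : c0 ∈ seen := (PySem.Set.contains_iff _ _).mp hmem
          have hstep : pvBStep (seen, best) r = (seen, best) := by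
            simp [pvBStep, htgt, hfc, hmem, hmem']
          rw [hstep, ih]
          have hAt : ∀ c, pvCandAt (r :: t) seen c = pvCandAt t seen c := by
            intro c
            by_cases hc : c = c0
            · subst hc; simp [pvCandAt, hmem, hmem']
            · exact pvCandAt_cons_neg
                (by simp [pvIsTgt, htgt, hfc]; exact fun h => hc h.symm)
          unfold pvCandFold
          rw [hAt, hAt, hAt, hAt]
        | false =>
          have hmem' : c0 ∉ seen := fun hm => by
            rw [(PySem.Set.contains_iff _ _).mpr hm] at hmem; cases hmem
          have hne_all : ∀ c, c ≠ c0 →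
              pvCandAt (r :: t) seen c = pvCandAt t (PySem.Set.add seen c0) c := by
            intro c hc
            have hp : (pvIsTgt r && (pvRowGet? r "forcing_component" == some c)) = false := by
              simp [pvIsTgt, htgt, hfc]; exact fun h => hc h.symm
            unfold pvCandAt
            rw [pvContains_add_of_ne hc, pvW_cons_neg hp]
          have hW : pvW (r :: t) c0 = some r := by
            apply List.find?_cons_of_pos; simp [pvIsTgt, htgt, hfc]
          have hself_rt : pvCandAt (r :: t) seen c0 = (if pvBlocked r then some r else none) := by
            simp [pvCandAt, hmem, hmem', hW]
          have hmemadd : c0 ∈ PySem.Set.add seen c0 :=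
            (PySem.Set.mem_add _ _ _).mpr (Or.inr rfl)
          have hself_t : pvCandAt t (PySem.Set.add seen c0) c0 = none := by
            simp [pvCandAt, pvContains_add_self, hmemadd]
          cases hpi : pvPriorityIdx c0 with
          | none =>
            have hstep : pvBStep (seen, best) r = (PySem.Set.add seen c0, best) := by
              simp [pvBStep, htgt, hfc, hmem, hmem', hpi]
            rw [hstep, ih]
            have h0 : "currents_primary" ≠ c0 := by
              intro h; rw [← h] at hpi; simp [pvPriorityIdx] at hpi
            have h1 : "winds_primary" ≠ c0 := by
              intro h; rw [← h] at hpi; simp [pvPriorityIdx] at hpi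
            have h2 : "waves_primary" ≠ c0 := by
              intro h; rw [← h] at hpi; simp [pvPriorityIdx] at hpi
            have h3 : "currents_fallback" ≠ c0 := by
              intro h; rw [← h] at hpi; simp [pvPriorityIdx] at hpi
            unfold pvCandFold
            rw [hne_all _ h0, hne_all _ h1, hne_all _ h2, hne_all _ h3]
          | some p0 =>
            have hc0 : (c0 = "currents_primary" ∧ p0 = 0) ∨ (c0 = "winds_primary" ∧ p0 = 1) ∨
                (c0 = "waves_primary" ∧ p0 = 2) ∨ (c0 = "currents_fallback" ∧ p0 = 3) := by
              by_cases e0 : c0 = "currents_primary"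
              · subst e0; simp [pvPriorityIdx] at hpi; exact Or.inl ⟨rfl, hpi.symm⟩
              by_cases e1 : c0 = "winds_primary"
              · subst e1; simp [pvPriorityIdx] at hpi; exact Or.inr (Or.inl ⟨rfl, hpi.symm⟩)
              by_cases e2 : c0 = "waves_primary"
              · subst e2; simp [pvPriorityIdx] at hpi; exact Or.inr (Or.inr (Or.inl ⟨rfl, hpi.symm⟩))
              by_cases e3 : c0 = "currents_fallback"
              · subst e3; simp [pvPriorityIdx] at hpi
                exact Or.inr (Or.inr (Or.inr ⟨rfl, hpi.symm⟩))
              · exfalso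
                have b0 : ("currents_primary" == c0) = false :=
                  beq_eq_false_iff_ne.mpr (fun h => e0 h.symm)
                have b1 : ("winds_primary" == c0) = false :=
                  beq_eq_false_iff_ne.mpr (fun h => e1 h.symm)
                have b2 : ("waves_primary" == c0) = false :=
                  beq_eq_false_iff_ne.mpr (fun h => e2 h.symm)
                have b3 : ("currents_fallback" == c0) = false :=
                  beq_eq_false_iff_ne.mpr (fun h => e3 h.symm)
                simp [pvPriorityIdx, List.find?, b0, b1, b2, b3] at hpi
            cases hb : pvBlocked r with
            | false =>
              have hstep : pvBStep (seen, best) r = (PySem.Set.add seen c0, best) := by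
                simp [pvBStep, htgt, hfc, hmem, hmem', hpi, hb]
              rw [hstep, ih]
              rcases hc0 with ⟨hc, hp⟩ | ⟨hc, hp⟩ | ⟨hc, hp⟩ | ⟨hc, hp⟩ <;> subst hc
              · unfold pvCandFold
                rw [hne_all "winds_primary" (by decide), hne_all "waves_primary" (by decide),
                  hne_all "currents_fallback" (by decide), hself_rt, hself_t, hb]
                simp
              · unfold pvCandFold
                rw [hne_all "currents_primary" (by decide), hne_all "waves_primary" (by decide),
                  hne_all "currents_fallback" (by decide), hself_rt, hself_t, hb]
                simp
              · unfold pvCandFold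
                rw [hne_all "currents_primary" (by decide), hne_all "winds_primary" (by decide),
                  hne_all "currents_fallback" (by decide), hself_rt, hself_t, hb]
                simp
              · unfold pvCandFold
                rw [hne_all "currents_primary" (by decide), hne_all "winds_primary" (by decide),
                  hne_all "waves_primary" (by decide), hself_rt, hself_t, hb]
                simp
            | true =>
              have hstep : pvBStep (seen, best) r =
                  (PySem.Set.add seen c0, pvMerge best (p0, r)) := by
                simp [pvBStep, htgt, hfc, hmem, hmem', hpi, hb]
              rw [hstep, ih]
              rcases hc0 with ⟨hc, hp⟩ | ⟨hc, hp⟩ | ⟨hc, hp⟩ | ⟨hc, hp⟩ <;> subst hc <;> subst hp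
              · unfold pvCandFold
                rw [hne_all "winds_primary" (by decide), hne_all "waves_primary" (by decide),
                  hne_all "currents_fallback" (by decide), hself_rt, hself_t, hb]
                simp only [List.foldl_cons, List.foldl_nil, pvStepC_none, pvMerge_as_stepC,
                  eq_self_iff_true, if_true]
              · unfold pvCandFold
                rw [hne_all "currents_primary" (by decide), hne_all "waves_primary" (by decide),
                  hne_all "currents_fallback" (by decide), hself_rt, hself_t, hb]
                simp only [List.foldl_cons, List.foldl_nil, pvStepC_none, pvMerge_as_stepC,
                  eq_self_iff_true, if_true]
                rw [pvStepC_comm best ((1 : Int), some r) ((0 : Int), (pvCandAt t (PySem.Set.add seen "winds_primary") "currents_primary")) (by simp)]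
              · unfold pvCandFold
                rw [hne_all "currents_primary" (by decide), hne_all "winds_primary" (by decide),
                  hne_all "currents_fallback" (by decide), hself_rt, hself_t, hb]
                simp only [List.foldl_cons, List.foldl_nil, pvStepC_none, pvMerge_as_stepC,
                  eq_self_iff_true, if_true]
                rw [pvStepC_comm best ((2 : Int), some r) ((0 : Int), (pvCandAt t (PySem.Set.add seen "waves_primary") "currents_primary")) (by simp)]
                rw [pvStepC_comm (pvStepC best ((0 : Int), (pvCandAt t (PySem.Set.add seen "waves_primary") "currents_primary"))) ((2 : Int), some r) ((1 : Int), (pvCandAt t (PySem.Set.add seen "waves_primary") "winds_primary")) (by simp)]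
              · unfold pvCandFold
                rw [hne_all "currents_primary" (by decide), hne_all "winds_primary" (by decide),
                  hne_all "waves_primary" (by decide), hself_rt, hself_t, hb]
                simp only [List.foldl_cons, List.foldl_nil, pvStepC_none, pvMerge_as_stepC,
                  eq_self_iff_true, if_true]
                rw [pvStepC_comm best ((3 : Int), some r) ((0 : Int), (pvCandAt t (PySem.Set.add seen "currents_fallback") "currents_primary")) (by simp)]
                rw [pvStepC_comm (pvStepC best ((0 : Int), (pvCandAt t (PySem.Set.add seen "currents_fallback") "currents_primary"))) ((3 : Int), some r) ((1 : Int), (pvCandAt t (PySem.Set.add seen "currents_fallback") "winds_primary")) (by simp)]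
                rw [pvStepC_comm (pvStepC (pvStepC best ((0 : Int), (pvCandAt t (PySem.Set.add seen "currents_fallback") "currents_primary"))) ((1 : Int), (pvCandAt t (PySem.Set.add seen "currents_fallback") "winds_primary"))) ((3 : Int), some r) ((2 : Int), (pvCandAt t (PySem.Set.add seen "currents_fallback") "waves_primary")) (by simp)]


-- A's dict answers each lookup with the last matching scientific_target row
theorem pv_get_foldl (rows : List (List (String × String)))
    (d : PySem.Dict String (List (String × String))) (c : String) :
    (rows.foldl pvAStep d).get? c =
      (((rows.filter (fun r => pvRowGet? r "source_role" == some "scientific_target")).reverse.find?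
          (fun r => pvRowGet? r "forcing_component" == some c)).or (d.get? c)) := by
  induction rows generalizing d with
  | nil => simp
  | cons r rs ih =>
    simp only [List.foldl_cons, List.filter_cons]
    by_cases htgt : (pvRowGet? r "source_role" == some "scientific_target") = true
    · rw [if_pos htgt]
      simp only [List.reverse_cons, List.find?_append, ih, Option.or_assoc]
      congr 1
      unfold pvAStep
      rw [if_pos htgt]
      cases hfc : pvRowGet? r "forcing_component" with
      | none => simp [hfc]
      | some k =>
        simp only [PySem.Dict.get?_insert]
        by_cases hck : c = k
        · subst hck; simp [hfc]
        · have hb : (some k == some c) = false := by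
            simp only [beq_eq_false_iff_ne, ne_eq, Option.some.injEq]
            exact fun h => hck h.symm
          simp [if_neg hck, List.find?, hfc, hb]
    · rw [if_neg htgt]
      rw [ih]
      congr 1
      unfold pvAStep
      rw [if_neg htgt]

-- the dict lookup is pvW on the reversed row list
theorem pv_get_eq_pvW (rows : List (List (String × String))) (c : String) :
    (rows.foldl pvAStep PySem.Dict.empty).get? c = pvW rows.reverse c := by
  rw [pv_get_foldl]
  simp only [PySem.Dict.get?_empty, Option.or_none, pvW, pvIsTgt, ← List.filter_reverse,
    List.find?_filter]
  congr 1
  funext r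
  rw [Bool.beq_eq_decide_eq, Bool.beq_eq_decide_eq]
  simp

theorem pvW_some_ne_empty {l : List (List (String × String))} {c : String}
    {r : List (String × String)} (h : pvW l c = some r) : r.isEmpty = false := by
  have hp := List.find?_some h
  cases r with
  | nil => simp [pvIsTgt, pvRowGet?, List.find?] at hp
  | cons p ps => rfl

-- candidate with nothing seen yet
theorem pvCandAt_empty (l : List (List (String × String))) (c : String) :
    pvCandAt l PySem.Set.empty c =
      (match pvW l c with
        | some r => if pvBlocked r then some r else none
        | none => none) := by
  simp [pvCandAt, PySem.Set.empty]

-- ===== VERDICT (by name: the statement is the Claim_ definition above) =====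
theorem single_blocker_py_spec : Claim_equal_single_blocker_py := by
  intro rows _dom _pre
  unfold Spec_single_blocker_py single_blocker_py single_blocker_py_alt
  rw [pvB_inv]
  simp only [pvPriority, pvALoop, pv_get_eq_pvW, pvCandFold, pvCandAt_empty,
    List.foldl_cons, List.foldl_nil]
  cases h0 : pvW rows.reverse "currents_primary" with
  | none =>
    cases h1 : pvW rows.reverse "winds_primary" with
    | none =>
      cases h2 : pvW rows.reverse "waves_primary" with
      | none =>
        cases h3 : pvW rows.reverse "currents_fallback" with
        | none =>
          simp_all [pvStepC, pvMerge]
        | some r3 =>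
          have hE3 : r3.isEmpty = false := pvW_some_ne_empty h3
          cases hb3 : pvBlocked r3 with
          | false =>
            simp_all [pvStepC, pvMerge]
          | true =>
            simp_all [pvStepC, pvMerge]
      | some r2 =>
        have hE2 : r2.isEmpty = false := pvW_some_ne_empty h2
        cases hb2 : pvBlocked r2 with
        | false =>
          cases h3 : pvW rows.reverse "currents_fallback" with
          | none =>
            simp_all [pvStepC, pvMerge]
          | some r3 =>
            have hE3 : r3.isEmpty = false := pvW_some_ne_empty h3
            cases hb3 : pvBlocked r3 with
            | false =>
              simp_all [pvStepC, pvMerge]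
            | true =>
              simp_all [pvStepC, pvMerge]
        | true =>
          cases h3 : pvW rows.reverse "currents_fallback" with
          | none =>
            simp_all [pvStepC, pvMerge]
          | some r3 =>
            have hE3 : r3.isEmpty = false := pvW_some_ne_empty h3
            cases hb3 : pvBlocked r3 with
            | false =>
              simp_all [pvStepC, pvMerge]
            | true =>
              simp_all [pvStepC, pvMerge]
    | some r1 =>
      have hE1 : r1.isEmpty = false := pvW_some_ne_empty h1
      cases hb1 : pvBlocked r1 with
      | false =>
        cases h2 : pvW rows.reverse "waves_primary" with
        | none =>
          cases h3 : pvW rows.reverse "currents_fallback" with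
          | none =>
            simp_all [pvStepC, pvMerge]
          | some r3 =>
            have hE3 : r3.isEmpty = false := pvW_some_ne_empty h3
            cases hb3 : pvBlocked r3 with
            | false =>
              simp_all [pvStepC, pvMerge]
            | true =>
              simp_all [pvStepC, pvMerge]
        | some r2 =>
          have hE2 : r2.isEmpty = false := pvW_some_ne_empty h2
          cases hb2 : pvBlocked r2 with
          | false =>
            cases h3 : pvW rows.reverse "currents_fallback" with
            | none =>
              simp_all [pvStepC, pvMerge]
            | some r3 =>
              have hE3 : r3.isEmpty = false := pvW_some_ne_empty h3
              cases hb3 : pvBlocked r3 with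
              | false =>
                simp_all [pvStepC, pvMerge]
              | true =>
                simp_all [pvStepC, pvMerge]
          | true =>
            cases h3 : pvW rows.reverse "currents_fallback" with
            | none =>
              simp_all [pvStepC, pvMerge]
            | some r3 =>
              have hE3 : r3.isEmpty = false := pvW_some_ne_empty h3
              cases hb3 : pvBlocked r3 with
              | false =>
                simp_all [pvStepC, pvMerge]
              | true =>
                simp_all [pvStepC, pvMerge]
      | true =>
        cases h2 : pvW rows.reverse "waves_primary" with
        | none =>
          cases h3 : pvW rows.reverse "currents_fallback" with
          | none =>
            simp_all [pvStepC, pvMerge]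
          | some r3 =>
            have hE3 : r3.isEmpty = false := pvW_some_ne_empty h3
            cases hb3 : pvBlocked r3 with
            | false =>
              simp_all [pvStepC, pvMerge]
            | true =>
              simp_all [pvStepC, pvMerge]
        | some r2 =>
          have hE2 : r2.isEmpty = false := pvW_some_ne_empty h2
          cases hb2 : pvBlocked r2 with
          | false =>
            cases h3 : pvW rows.reverse "currents_fallback" with
            | none =>
              simp_all [pvStepC, pvMerge]
            | some r3 =>
              have hE3 : r3.isEmpty = false := pvW_some_ne_empty h3
              cases hb3 : pvBlocked r3 with
              | false =>
                simp_all [pvStepC, pvMerge]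
              | true =>
                simp_all [pvStepC, pvMerge]
          | true =>
            cases h3 : pvW rows.reverse "currents_fallback" with
            | none =>
              simp_all [pvStepC, pvMerge]
            | some r3 =>
              have hE3 : r3.isEmpty = false := pvW_some_ne_empty h3
              cases hb3 : pvBlocked r3 with
              | false =>
                simp_all [pvStepC, pvMerge]
              | true =>
                simp_all [pvStepC, pvMerge]
  | some r0 =>
    have hE0 : r0.isEmpty = false := pvW_some_ne_empty h0
    cases hb0 : pvBlocked r0 with
    | false =>
      cases h1 : pvW rows.reverse "winds_primary" with
      | none =>
        cases h2 : pvW rows.reverse "waves_primary" with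
        | none =>
          cases h3 : pvW rows.reverse "currents_fallback" with
          | none =>
            simp_all [pvStepC, pvMerge]
          | some r3 =>
            have hE3 : r3.isEmpty = false := pvW_some_ne_empty h3
            cases hb3 : pvBlocked r3 with
            | false =>
              simp_all [pvStepC, pvMerge]
            | true =>
              simp_all [pvStepC, pvMerge]
        | some r2 =>
          have hE2 : r2.isEmpty = false := pvW_some_ne_empty h2
          cases hb2 : pvBlocked r2 with
          | false =>
            cases h3 : pvW rows.reverse "currents_fallback" with
            | none =>
              simp_all [pvStepC, pvMerge]
            | some r3 =>
              have hE3 : r3.isEmpty = false := pvW_some_ne_empty h3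
              cases hb3 : pvBlocked r3 with
              | false =>
                simp_all [pvStepC, pvMerge]
              | true =>
                simp_all [pvStepC, pvMerge]
          | true =>
            cases h3 : pvW rows.reverse "currents_fallback" with
            | none =>
              simp_all [pvStepC, pvMerge]
            | some r3 =>
              have hE3 : r3.isEmpty = false := pvW_some_ne_empty h3
              cases hb3 : pvBlocked r3 with
              | false =>
                simp_all [pvStepC, pvMerge]
              | true =>
                simp_all [pvStepC, pvMerge]
      | some r1 =>
        have hE1 : r1.isEmpty = false := pvW_some_ne_empty h1
        cases hb1 : pvBlocked r1 with
        | false =>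
          cases h2 : pvW rows.reverse "waves_primary" with
          | none =>
            cases h3 : pvW rows.reverse "currents_fallback" with
            | none =>
              simp_all [pvStepC, pvMerge]
            | some r3 =>
              have hE3 : r3.isEmpty = false := pvW_some_ne_empty h3
              cases hb3 : pvBlocked r3 with
              | false =>
                simp_all [pvStepC, pvMerge]
              | true =>
                simp_all [pvStepC, pvMerge]
          | some r2 =>
            have hE2 : r2.isEmpty = false := pvW_some_ne_empty h2
            cases hb2 : pvBlocked r2 with
            | false =>
              cases h3 : pvW rows.reverse "currents_fallback" with
              | none =>
                simp_all [pvStepC, pvMerge]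
              | some r3 =>
                have hE3 : r3.isEmpty = false := pvW_some_ne_empty h3
                cases hb3 : pvBlocked r3 with
                | false =>
                  simp_all [pvStepC, pvMerge]
                | true =>
                  simp_all [pvStepC, pvMerge]
            | true =>
              cases h3 : pvW rows.reverse "currents_fallback" with
              | none =>
                simp_all [pvStepC, pvMerge]
              | some r3 =>
                have hE3 : r3.isEmpty = false := pvW_some_ne_empty h3
                cases hb3 : pvBlocked r3 with
                | false =>
                  simp_all [pvStepC, pvMerge]
                | true =>
                  simp_all [pvStepC, pvMerge]
        | true =>
          cases h2 : pvW rows.reverse "waves_primary" with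
          | none =>
            cases h3 : pvW rows.reverse "currents_fallback" with
            | none =>
              simp_all [pvStepC, pvMerge]
            | some r3 =>
              have hE3 : r3.isEmpty = false := pvW_some_ne_empty h3
              cases hb3 : pvBlocked r3 with
              | false =>
                simp_all [pvStepC, pvMerge]
              | true =>
                simp_all [pvStepC, pvMerge]
          | some r2 =>
            have hE2 : r2.isEmpty = false := pvW_some_ne_empty h2
            cases hb2 : pvBlocked r2 with
            | false =>
              cases h3 : pvW rows.reverse "currents_fallback" with
              | none =>
                simp_all [pvStepC, pvMerge]
              | some r3 =>
                have hE3 : r3.isEmpty = false := pvW_some_ne_empty h3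
                cases hb3 : pvBlocked r3 with
                | false =>
                  simp_all [pvStepC, pvMerge]
                | true =>
                  simp_all [pvStepC, pvMerge]
            | true =>
              cases h3 : pvW rows.reverse "currents_fallback" with
              | none =>
                simp_all [pvStepC, pvMerge]
              | some r3 =>
                have hE3 : r3.isEmpty = false := pvW_some_ne_empty h3
                cases hb3 : pvBlocked r3 with
                | false =>
                  simp_all [pvStepC, pvMerge]
                | true =>
                  simp_all [pvStepC, pvMerge]
    | true =>
      cases h1 : pvW rows.reverse "winds_primary" with
      | none =>
        cases h2 : pvW rows.reverse "waves_primary" with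
        | none =>
          cases h3 : pvW rows.reverse "currents_fallback" with
          | none =>
            simp_all [pvStepC, pvMerge]
          | some r3 =>
            have hE3 : r3.isEmpty = false := pvW_some_ne_empty h3
            cases hb3 : pvBlocked r3 with
            | false =>
              simp_all [pvStepC, pvMerge]
            | true =>
              simp_all [pvStepC, pvMerge]
        | some r2 =>
          have hE2 : r2.isEmpty = false := pvW_some_ne_empty h2
          cases hb2 : pvBlocked r2 with
          | false =>
            cases h3 : pvW rows.reverse "currents_fallback" with
            | none =>
              simp_all [pvStepC, pvMerge]
            | some r3 =>
              have hE3 : r3.isEmpty = false := pvW_some_ne_empty h3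
              cases hb3 : pvBlocked r3 with
              | false =>
                simp_all [pvStepC, pvMerge]
              | true =>
                simp_all [pvStepC, pvMerge]
          | true =>
            cases h3 : pvW rows.reverse "currents_fallback" with
            | none =>
              simp_all [pvStepC, pvMerge]
            | some r3 =>
              have hE3 : r3.isEmpty = false := pvW_some_ne_empty h3
              cases hb3 : pvBlocked r3 with
              | false =>
                simp_all [pvStepC, pvMerge]
              | true =>
                simp_all [pvStepC, pvMerge]
      | some r1 =>
        have hE1 : r1.isEmpty = false := pvW_some_ne_empty h1
        cases hb1 : pvBlocked r1 with
        | false =>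
          cases h2 : pvW rows.reverse "waves_primary" with
          | none =>
            cases h3 : pvW rows.reverse "currents_fallback" with
            | none =>
              simp_all [pvStepC, pvMerge]
            | some r3 =>
              have hE3 : r3.isEmpty = false := pvW_some_ne_empty h3
              cases hb3 : pvBlocked r3 with
              | false =>
                simp_all [pvStepC, pvMerge]
              | true =>
                simp_all [pvStepC, pvMerge]
          | some r2 =>
            have hE2 : r2.isEmpty = false := pvW_some_ne_empty h2
            cases hb2 : pvBlocked r2 with
            | false =>
              cases h3 : pvW rows.reverse "currents_fallback" with
              | none =>
                simp_all [pvStepC, pvMerge]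
              | some r3 =>
                have hE3 : r3.isEmpty = false := pvW_some_ne_empty h3
                cases hb3 : pvBlocked r3 with
                | false =>
                  simp_all [pvStepC, pvMerge]
                | true =>
                  simp_all [pvStepC, pvMerge]
            | true =>
              cases h3 : pvW rows.reverse "currents_fallback" with
              | none =>
                simp_all [pvStepC, pvMerge]
              | some r3 =>
                have hE3 : r3.isEmpty = false := pvW_some_ne_empty h3
                cases hb3 : pvBlocked r3 with
                | false =>
                  simp_all [pvStepC, pvMerge]
                | true =>
                  simp_all [pvStepC, pvMerge]
        | true =>
          cases h2 : pvW rows.reverse "waves_primary" with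
          | none =>
            cases h3 : pvW rows.reverse "currents_fallback" with
            | none =>
              simp_all [pvStepC, pvMerge]
            | some r3 =>
              have hE3 : r3.isEmpty = false := pvW_some_ne_empty h3
              cases hb3 : pvBlocked r3 with
              | false =>
                simp_all [pvStepC, pvMerge]
              | true =>
                simp_all [pvStepC, pvMerge]
          | some r2 =>
            have hE2 : r2.isEmpty = false := pvW_some_ne_empty h2
            cases hb2 : pvBlocked r2 with
            | false =>
              cases h3 : pvW rows.reverse "currents_fallback" with
              | none =>
                simp_all [pvStepC, pvMerge]
              | some r3 =>
                have hE3 : r3.isEmpty = false := pvW_some_ne_empty h3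
                cases hb3 : pvBlocked r3 with
                | false =>
                  simp_all [pvStepC, pvMerge]
                | true =>
                  simp_all [pvStepC, pvMerge]
            | true =>
              cases h3 : pvW rows.reverse "currents_fallback" with
              | none =>
                simp_all [pvStepC, pvMerge]
              | some r3 =>
                have hE3 : r3.isEmpty = false := pvW_some_ne_empty h3
                cases hb3 : pvBlocked r3 with
                | false =>
                  simp_all [pvStepC, pvMerge]
                | true =>
                  simp_all [pvStepC, pvMerge]
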